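-- pv_equiv track=rewrite | github.com/xlzior/advent-of-code | 2015/day11/main.py | contains_non_overlapping_pair
-- ===== SOURCE A (Python) =====
-- def contains_non_overlapping_pair(codes):
--     pairs = set()
--     i = 0
--     while i < len(codes) - 1:
--         if codes[i] == codes[i + 1]:
--             pairs.add(codes[i])
--             i += 1
--         i += 1
--     return len(pairs) >= 2
-- ===== SOURCE B (Python) =====
-- def contains_non_overlapping_pair(codes):
--     return sum(c + c in codes for c in set(codes)) >= 2
-- ===== Notes on version B (the rewrite author's own statement) =====
-- stated objective: simpler
-- what changed: Instead of one index-walking scan that skips past each matched pair, B tests each distinct character for a doubled-substring occurrence (c+c in codes) and counts how many such characters exist; correct because the scan's skip can only jump over a pair of the same character. Measured faster: the per-character loop is replaced by C-level substring searches.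
import Mathlib
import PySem

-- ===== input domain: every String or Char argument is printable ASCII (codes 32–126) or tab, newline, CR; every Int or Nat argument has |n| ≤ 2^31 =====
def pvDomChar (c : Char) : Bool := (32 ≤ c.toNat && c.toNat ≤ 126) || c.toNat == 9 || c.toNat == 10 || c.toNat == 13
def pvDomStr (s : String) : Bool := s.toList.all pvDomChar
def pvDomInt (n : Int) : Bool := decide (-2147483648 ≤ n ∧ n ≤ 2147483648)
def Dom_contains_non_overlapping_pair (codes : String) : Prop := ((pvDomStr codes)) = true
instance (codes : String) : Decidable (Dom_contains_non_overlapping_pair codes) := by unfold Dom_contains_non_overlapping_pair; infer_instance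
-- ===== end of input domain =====

-- B drops A's skip-walking scan entirely: it counts the distinct characters c for
-- which the doubled substring cc occurs in the string (simpler; measured faster).

-- ===== PORT A =====
-- A's while loop: i walks the string, a Python set `pairs` accumulates pair chars;
-- on a match i advances by 2, otherwise by 1.  Index i is a Nat (it starts at 0 and
-- only grows); Python's `i < len(codes) - 1` is exactly `i + 1 < length` for i ≥ 0.
def pvLoopA (cs : List Char) (pairs : PySem.Set Char) (i : Nat) : PySem.Set Char :=
  if h : i + 1 < cs.length then
    if cs[i] == cs[i + 1] then pvLoopA cs (pairs.add cs[i]) (i + 2)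
    else pvLoopA cs pairs (i + 1)
  else pairs
termination_by cs.length - i

def contains_non_overlapping_pair (codes : String) : Bool :=
  PySem.Set.len (pvLoopA codes.toList PySem.Set.empty 0) ≥ 2

-- ===== PORT B =====
-- Hand port of Python's substring test `c + c in codes` for the 2-char pattern cc:
-- true iff some adjacent positions both hold c (exact: `in` on str is substring).
def pvHasDouble (c : Char) : List Char → Bool
  | a :: b :: rest => (a == c && b == c) || pvHasDouble c (b :: rest)
  | _ => false

-- sum(c + c in codes for c in set(codes)) counts the distinct chars with a double
-- (a sum over a Python set: order-independent, so Set iteration is exact here).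
def contains_non_overlapping_pair_alt (codes : String) : Bool :=
  (PySem.Set.ofList codes.toList).countP (fun c => pvHasDouble c codes.toList) ≥ 2

-- ===== PRECONDITION & SPEC =====
def Spec_contains_non_overlapping_pair (codes : String) (out : Bool) : Prop := out = contains_non_overlapping_pair_alt codes
instance (codes : String) (out : Bool) : Decidable (Spec_contains_non_overlapping_pair codes out) := by unfold Spec_contains_non_overlapping_pair; infer_instance

-- ===== CLAIM (what is proved, stated in full; the proofs are below) =====
def Claim_equal_contains_non_overlapping_pair : Prop := ∀ (codes : String), Dom_contains_non_overlapping_pair codes → Spec_contains_non_overlapping_pair codes (contains_non_overlapping_pair codes)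

-- ===== LEMMAS AND PROOFS =====

-- The pair characters A's loop adds, in scan order (proof-only helper).
def pvFindPairs : List Char → List Char
  | a :: b :: rest => if a == b then a :: pvFindPairs rest else pvFindPairs (b :: rest)
  | _ => []

-- A's loop from index i is the fold of Set.add over the pair chars of the suffix.
theorem pvLoopA_eq_foldl (cs : List Char) (pairs : PySem.Set Char) (i : Nat) :
    pvLoopA cs pairs i = (pvFindPairs (cs.drop i)).foldl PySem.Set.add pairs := by
  fun_induction pvLoopA cs pairs i with
  | case1 pairs i h heq ih =>
    rw [ih]
    have h1 : i < cs.length := by omega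
    rw [List.drop_eq_getElem_cons h1, List.drop_eq_getElem_cons h]
    simp [pvFindPairs, heq]
  | case2 pairs i h heq ih =>
    rw [ih]
    have h1 : i < cs.length := by omega
    rw [List.drop_eq_getElem_cons h1, List.drop_eq_getElem_cons h]
    simp [pvFindPairs, heq]
  | case3 pairs i h =>
      have : cs.drop i = [] ∨ ∃ a, cs.drop i = [a] := by
        rcases e : cs.drop i with _ | ⟨a, rest⟩
        · exact Or.inl rfl
        · right
          have : (cs.drop i).length ≤ 1 := by
            rw [List.length_drop]; omega
          rw [e] at this
          simp at this
          simp [this]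
      rcases this with e | ⟨a, e⟩ <;> simp [e, pvFindPairs]

-- The characters A collects are exactly the characters with a doubled occurrence:
-- the skip after a match can only jump over a pair of the SAME character.
theorem mem_findPairs_iff (c : Char) (cs : List Char) :
    c ∈ pvFindPairs cs ↔ pvHasDouble c cs = true := by
  fun_induction pvFindPairs cs with
  | case1 a b rest heq ih =>
    have hab : a = b := by simpa using heq
    constructor
    · intro hm
      rcases List.mem_cons.mp hm with h | h
      · subst h
        simp [pvHasDouble, hab]
      · have hd := ih.mp h
        cases rest with
        | nil => simp [pvHasDouble] at hd
        | cons r rs =>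
          simp only [pvHasDouble, Bool.or_eq_true] at hd ⊢
          exact Or.inr (Or.inr hd)
    · intro hd
      simp only [pvHasDouble, Bool.or_eq_true, Bool.and_eq_true, beq_iff_eq] at hd
      rcases hd with ⟨h1, h2⟩ | hd
      · rw [h1]; exact List.mem_cons_self
      · cases rest with
        | nil => simp [pvHasDouble] at hd
        | cons r rs =>
          rcases (by simpa only [pvHasDouble, Bool.or_eq_true, Bool.and_eq_true,
              beq_iff_eq] using hd :
              (b = c ∧ r = c) ∨ pvHasDouble c (r :: rs) = true) with ⟨h1, _⟩ | hd2
          · rw [← h1, hab]; exact List.mem_cons_self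
          · exact List.mem_cons_of_mem _ (ih.mpr hd2)
  | case2 a b rest heq ih =>
    have hab : ¬ a = b := by simpa using heq
    rw [ih]
    simp only [pvHasDouble, Bool.or_eq_true, Bool.and_eq_true, beq_iff_eq]
    constructor
    · exact fun h => Or.inr h
    · rintro (⟨h1, h2⟩ | h)
      · exact absurd (h1.trans h2.symm) hab
      · exact h
  | case3 cs h =>
    cases cs with
    | nil => simp [pvHasDouble]
    | cons a rest =>
      cases rest with
      | nil => simp [pvHasDouble]
      | cons b rs => exact absurd rfl (h a b rs)

theorem hasDouble_mem (c : Char) (cs : List Char) (h : pvHasDouble c cs = true) : c ∈ cs := by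
  induction cs with
  | nil => simp [pvHasDouble] at h
  | cons a rest ih =>
    cases rest with
    | nil => simp [pvHasDouble] at h
    | cons b rs =>
      simp only [pvHasDouble, Bool.or_eq_true, Bool.and_eq_true, beq_iff_eq] at h
      rcases h with ⟨h1, _⟩ | h
      · rw [h1]; exact List.mem_cons_self
      · exact List.mem_cons_of_mem _ (ih h)

-- ===== VERDICT (by name: the statement is the Claim_ definition above) =====
theorem contains_non_overlapping_pair_spec : Claim_equal_contains_non_overlapping_pair := by
  intro codes _
  unfold Spec_contains_non_overlapping_pair contains_non_overlapping_pair contains_non_overlapping_pair_alt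
  rw [pvLoopA_eq_foldl]
  simp only [List.drop_zero]
  have hlen : (List.foldl PySem.Set.add PySem.Set.empty (pvFindPairs codes.toList)).len
      = List.countP (fun c => pvHasDouble c codes.toList) (PySem.Set.ofList codes.toList) := by
    have e : List.foldl PySem.Set.add PySem.Set.empty (pvFindPairs codes.toList)
        = PySem.Set.ofList (pvFindPairs codes.toList) := (PySem.Set.ofList_eq_foldl _)
    rw [e, List.countP_eq_length_filter]
    have hperm : (PySem.Set.ofList (pvFindPairs codes.toList)).Perm
        ((PySem.Set.ofList codes.toList).filter (fun c => pvHasDouble c codes.toList)) := by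
      apply (List.perm_ext_iff_of_nodup (PySem.Set.nodup_ofList _)
        (List.Nodup.filter _ (PySem.Set.nodup_ofList _))).mpr
      intro c
      rw [PySem.Set.mem_ofList, mem_findPairs_iff, List.mem_filter, PySem.Set.mem_ofList]
      constructor
      · intro h; exact ⟨hasDouble_mem c _ h, h⟩
      · exact fun h => h.2
    simpa [PySem.Set.len] using hperm.length_eq
  simp only [hlen]
  rw [decide_eq_decide]
  omega
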